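-- pv_equiv track=rewrite | github.com/S12ahana/S12ahana-Arrear-Exam-Seating-Arrangement | za2,py.py | generate_combined_seating
-- ===== SOURCE A (Python) =====
-- def generate_combined_seating(num_classes, rows, columns, maths_roll_numbers, physics_roll_numbers):
--     total_seats_per_class = rows * columns
--
--
--     maths_roll_numbers.sort()
--     physics_roll_numbers.sort()
--
--
--     seating_arrangements = []
--     student_index_maths = 0
--     student_index_physics = 0
--
--     for class_num in range(1, num_classes + 1):
--         seating_arrangement = [["Empty" for _ in range(columns * 2)] for _ in range(rows)]
--
--
--         for row in range(rows):
--             for col in range(0, columns * 2, 2):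
--                 if student_index_maths < len(maths_roll_numbers) and student_index_physics < len(physics_roll_numbers):
--                     seating_arrangement[row][col] = maths_roll_numbers[student_index_maths]
--                     seating_arrangement[row][col + 1] = physics_roll_numbers[student_index_physics]
--                     student_index_maths += 1
--                     student_index_physics += 1
--                 else:
--                     break
--
--
--         for row in range(rows):
--             for col in range(0, columns * 2, 2):
--                 if seating_arrangement[row][col] == "Empty":
--                     if student_index_maths < len(maths_roll_numbers):
--                         seating_arrangement[row][col] = maths_roll_numbers[student_index_maths]
--                         student_index_maths += 1
--                     elif student_index_physics < len(physics_roll_numbers):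
--                         seating_arrangement[row][col + 1] = physics_roll_numbers[student_index_physics]
--                         student_index_physics += 1
--
--         seating_arrangements.append(seating_arrangement)
--
--     return seating_arrangements
-- ===== SOURCE B (Python) =====
-- def generate_combined_seating(num_classes, rows, columns, maths_roll_numbers, physics_roll_numbers):
--     # One flat pass over seat slots instead of A's per-class two-phase (pair pass + rescan).
--     maths_roll_numbers.sort()
--     physics_roll_numbers.sort()
--     m, p = maths_roll_numbers, physics_roll_numbers
--     grids = [[["Empty"] * (columns * 2) for _ in range(rows)] for _ in range(num_classes)]
--     im = ip = 0
--     slots = ((g, r, c) for g in range(num_classes)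
--                        for r in range(rows)
--                        for c in range(0, columns * 2, 2))
--     for (g, r, c) in slots:
--         if im < len(m) and ip < len(p):
--             grids[g][r][c] = m[im]
--             grids[g][r][c + 1] = p[ip]
--             im += 1
--             ip += 1
--         elif im < len(m):
--             grids[g][r][c] = m[im]
--             im += 1
--         elif ip < len(p):
--             grids[g][r][c + 1] = p[ip]
--             ip += 1
--         else:
--             break
--     return grids
-- ===== Notes on version B (the rewrite author's own statement) =====
-- stated objective: simpler
-- what changed: A fills each class grid in two phases (a pair-filling pass with an inner-loop break, then a full rescan that hunts for 'Empty' even seats to place leftovers); B makes one flat pass over the (class,row,col) slot stream with a single if/elif state machine and never re-reads the grid. (dropping A's per-class full rescan and its exhausted-pair loop re-entries, a constant-factor saving)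
-- outside the precondition, e.g. on generate_combined_seating(1, 1, 1, ['Empty', 'x'], ['q', 's']): A returns [[['x', 'q']]], B returns [[['Empty', 'q']]]
import Mathlib
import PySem

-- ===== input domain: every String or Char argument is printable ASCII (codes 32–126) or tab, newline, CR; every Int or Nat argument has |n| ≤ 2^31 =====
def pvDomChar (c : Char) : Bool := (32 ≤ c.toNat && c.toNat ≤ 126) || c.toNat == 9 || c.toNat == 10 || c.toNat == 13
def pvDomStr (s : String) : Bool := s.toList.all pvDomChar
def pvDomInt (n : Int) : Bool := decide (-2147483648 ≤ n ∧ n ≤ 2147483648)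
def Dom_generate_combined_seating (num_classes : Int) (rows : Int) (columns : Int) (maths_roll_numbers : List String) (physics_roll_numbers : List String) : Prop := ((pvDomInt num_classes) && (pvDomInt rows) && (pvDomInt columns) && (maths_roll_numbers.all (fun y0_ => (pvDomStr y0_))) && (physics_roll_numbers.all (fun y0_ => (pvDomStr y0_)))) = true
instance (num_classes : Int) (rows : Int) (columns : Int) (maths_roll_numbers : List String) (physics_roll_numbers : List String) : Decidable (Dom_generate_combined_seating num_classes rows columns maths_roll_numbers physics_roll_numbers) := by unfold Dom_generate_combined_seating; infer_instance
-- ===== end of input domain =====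

-- B replaces A's per-class two-phase filling (pair pass with break + full rescan for leftovers) by one flat
-- pass over all seat slots; objective: simpler.  Equivalence is about the RETURN value only: the Python A
-- sorts both argument lists in place, and the Python B performs the same in-place sorts.

-- ===== PORT A =====
-- grid writes/reads: indices are loop indices from range(), always ≥ 0 and in range, so .toNat is exact here
def pvSet2 (g : List (List String)) (r c : Nat) (v : String) : List (List String) :=
  g.set r ((g.getD r []).set c v)

def pvGet2 (g : List (List String)) (r c : Nat) : String :=
  (g.getD r []).getD c ""

-- inner 'for col' loop of A's first phase, with its break (returns the state unchanged and stops)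
def pvPhase1Cols (m p : List String) (row : Int) :
    List Int → List (List String) × Nat × Nat → List (List String) × Nat × Nat
  | [], st => st
  | c :: rest, (g, im, ip) =>
    if im < m.length ∧ ip < p.length then
      pvPhase1Cols m p row rest
        (pvSet2 (pvSet2 g row.toNat c.toNat (m.getD im "")) row.toNat (c.toNat + 1) (p.getD ip ""),
         im + 1, ip + 1)
    else (g, im, ip)

-- body of A's second phase for one cell
def pvPhase2Cell (m p : List String) (row : Int)
    (st : List (List String) × Nat × Nat) (c : Int) : List (List String) × Nat × Nat :=
  if pvGet2 st.1 row.toNat c.toNat = "Empty" then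
    if st.2.1 < m.length then
      (pvSet2 st.1 row.toNat c.toNat (m.getD st.2.1 ""), st.2.1 + 1, st.2.2)
    else if st.2.2 < p.length then
      (pvSet2 st.1 row.toNat (c.toNat + 1) (p.getD st.2.2 ""), st.2.1, st.2.2 + 1)
    else st
  else st

def generate_combined_seating (num_classes : Int) (rows : Int) (columns : Int) (maths_roll_numbers : List String) (physics_roll_numbers : List String) : List (List (List String)) :=
  let m := PySem.List.sorted maths_roll_numbers (fun x => x) false
  let p := PySem.List.sorted physics_roll_numbers (fun x => x) false
  let res := (PySem.List.pyRange 1 (num_classes + 1) 1).foldl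
    (fun st _ =>
      let g0 := (PySem.List.pyRange 0 rows 1).map
        (fun _ => (PySem.List.pyRange 0 (columns * 2) 1).map (fun _ => "Empty"))
      let st1 := (PySem.List.pyRange 0 rows 1).foldl
        (fun s r => pvPhase1Cols m p r (PySem.List.pyRange 0 (columns * 2) 2) s)
        (g0, st.2.1, st.2.2)
      let st2 := (PySem.List.pyRange 0 rows 1).foldl
        (fun s r => (PySem.List.pyRange 0 (columns * 2) 2).foldl (pvPhase2Cell m p r) s) st1
      (st.1 ++ [st2.1], st2.2.1, st2.2.2))
    ([], 0, 0)
  res.1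

-- ===== PORT B =====
-- grids[g][r][c] = v  (indices are loop indices from range(), always ≥ 0 and in range, so .toNat is exact)
def pvSet3 (gs : List (List (List String))) (g r c : Nat) (v : String) : List (List (List String)) :=
  gs.set g ((gs.getD g []).set r (((gs.getD g []).getD r []).set c v))

-- the single flat loop of B over the slot stream, with its break
def pvRunSlots (m p : List String) :
    List (Int × Int × Int) → List (List (List String)) × Nat × Nat → List (List (List String)) × Nat × Nat
  | [], st => st
  | (g, r, c) :: rest, (gs, im, ip) =>
    if im < m.length ∧ ip < p.length then
      pvRunSlots m p rest
        (pvSet3 (pvSet3 gs g.toNat r.toNat c.toNat (m.getD im "")) g.toNat r.toNat (c.toNat + 1) (p.getD ip ""),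
         im + 1, ip + 1)
    else if im < m.length then
      pvRunSlots m p rest (pvSet3 gs g.toNat r.toNat c.toNat (m.getD im ""), im + 1, ip)
    else if ip < p.length then
      pvRunSlots m p rest (pvSet3 gs g.toNat r.toNat (c.toNat + 1) (p.getD ip ""), im, ip + 1)
    else (gs, im, ip)

def generate_combined_seating_alt (num_classes : Int) (rows : Int) (columns : Int) (maths_roll_numbers : List String) (physics_roll_numbers : List String) : List (List (List String)) :=
  let m := PySem.List.sorted maths_roll_numbers (fun x => x) false
  let p := PySem.List.sorted physics_roll_numbers (fun x => x) false
  let grids := (PySem.List.pyRange 0 num_classes 1).map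
    (fun _ => (PySem.List.pyRange 0 rows 1).map (fun _ => List.replicate (columns * 2).toNat "Empty"))
  let slots := (PySem.List.pyRange 0 num_classes 1).flatMap
    (fun g => (PySem.List.pyRange 0 rows 1).flatMap
      (fun r => (PySem.List.pyRange 0 (columns * 2) 2).map (fun c => (g, r, c))))
  (pvRunSlots m p slots (grids, 0, 0)).1

-- ===== PRECONDITION & SPEC =====
-- Pre_ excludes maths lists containing the literal sentinel string "Empty": there A's phase-2 test
-- seat == "Empty" mistakes a seat already filled with that roll number for a free seat and overwrites it,
-- an accident of the sentinel encoding on a corner no one would specify either way.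
def Pre_generate_combined_seating (num_classes : Int) (rows : Int) (columns : Int) (maths_roll_numbers : List String) (physics_roll_numbers : List String) : Prop :=
  "Empty" ∉ maths_roll_numbers
instance (num_classes : Int) (rows : Int) (columns : Int) (maths_roll_numbers : List String) (physics_roll_numbers : List String) : Decidable (Pre_generate_combined_seating num_classes rows columns maths_roll_numbers physics_roll_numbers) := by unfold Pre_generate_combined_seating; infer_instance

def pvWitness_generate_combined_seating : Int × Int × Int × List String × List String :=
  (2, 2, 2, ["m2", "m1", "m3"], ["p1", "p2"])

def Spec_generate_combined_seating (num_classes : Int) (rows : Int) (columns : Int) (maths_roll_numbers : List String) (physics_roll_numbers : List String) (out : List (List (List String))) : Prop := out = generate_combined_seating_alt num_classes rows columns maths_roll_numbers physics_roll_numbers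
instance (num_classes : Int) (rows : Int) (columns : Int) (maths_roll_numbers : List String) (physics_roll_numbers : List String) (out : List (List (List String))) : Decidable (Spec_generate_combined_seating num_classes rows columns maths_roll_numbers physics_roll_numbers out) := by unfold Spec_generate_combined_seating; infer_instance

-- ===== CLAIM (what is proved, stated in full; the proofs are below) =====
def Claim_equal_generate_combined_seating : Prop := ∀ (num_classes : Int) (rows : Int) (columns : Int) (maths_roll_numbers : List String) (physics_roll_numbers : List String), Dom_generate_combined_seating num_classes rows columns maths_roll_numbers physics_roll_numbers → Pre_generate_combined_seating num_classes rows columns maths_roll_numbers physics_roll_numbers → Spec_generate_combined_seating num_classes rows columns maths_roll_numbers physics_roll_numbers (generate_combined_seating num_classes rows columns maths_roll_numbers physics_roll_numbers)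

-- ===== LEMMAS AND PROOFS =====

-- proof-side vocabulary ------------------------------------------------------

-- one pair-filling step of A's first phase, as a fold step over (row, col) positions
def pvPairStep (m p : List String) (st : List (List String) × Nat × Nat) (q : Int × Int) :
    List (List String) × Nat × Nat :=
  if st.2.1 < m.length ∧ st.2.2 < p.length then
    (pvSet2 (pvSet2 st.1 q.1.toNat q.2.toNat (m.getD st.2.1 "")) q.1.toNat (q.2.toNat + 1) (p.getD st.2.2 ""),
     st.2.1 + 1, st.2.2 + 1)
  else st

def pvLeftStep (m p : List String) (st : List (List String) × Nat × Nat) (q : Int × Int) :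
    List (List String) × Nat × Nat :=
  pvPhase2Cell m p q.1 st q.2

-- B's per-cell step on a single grid (pure fold form, skipping instead of breaking)
def pvBStep (m p : List String) (st : List (List String) × Nat × Nat) (q : Int × Int) :
    List (List String) × Nat × Nat :=
  if st.2.1 < m.length ∧ st.2.2 < p.length then
    (pvSet2 (pvSet2 st.1 q.1.toNat q.2.toNat (m.getD st.2.1 "")) q.1.toNat (q.2.toNat + 1) (p.getD st.2.2 ""),
     st.2.1 + 1, st.2.2 + 1)
  else if st.2.1 < m.length then
    (pvSet2 st.1 q.1.toNat q.2.toNat (m.getD st.2.1 ""), st.2.1 + 1, st.2.2)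
  else if st.2.2 < p.length then
    (pvSet2 st.1 q.1.toNat (q.2.toNat + 1) (p.getD st.2.2 ""), st.2.1, st.2.2 + 1)
  else st

def pvQ (rows columns : Int) : List (Int × Int) :=
  (PySem.List.pyRange 0 rows 1).flatMap
    (fun r => (PySem.List.pyRange 0 (columns * 2) 2).map (fun c => (r, c)))

def pvFresh (rows columns : Int) : List (List String) :=
  List.replicate rows.toNat (List.replicate (columns * 2).toNat "Empty")

def pvClassBody (m p : List String) (rows columns : Int)
    (st : List (List (List String)) × Nat × Nat) : List (List (List String)) × Nat × Nat :=
  let f := (pvQ rows columns).foldl (pvBStep m p) (pvFresh rows columns, st.2.1, st.2.2)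
  (st.1 ++ [f.1], f.2.1, f.2.2)

def pvClassIter (m p : List String) (rows columns : Int) :
    Nat → List (List (List String)) × Nat × Nat → List (List (List String)) × Nat × Nat
  | 0, st => st
  | n + 1, st => pvClassIter m p rows columns n (pvClassBody m p rows columns st)

-- basic list helpers ---------------------------------------------------------

theorem pvGetD_set_ne {α : Type} (l : List α) (i j : Nat) (v d : α) (h : i ≠ j) :
    (l.set i v).getD j d = l.getD j d := by
  simp [List.getD_eq_getElem?_getD, List.getElem?_set_ne h]

theorem pvGetD_set_self {α : Type} (l : List α) (i : Nat) (v d : α) (h : i < l.length) :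
    (l.set i v).getD i d = v := by
  simp [List.getD_eq_getElem?_getD, h]

theorem pvSet_getD_self {α : Type} (l : List α) (i : Nat) (d : α) (h : i < l.length) :
    l.set i (l.getD i d) = l := by
  apply List.ext_getElem? ; intro n
  by_cases hn : n = i
  · subst hn; simp [h]
  · simp [List.getElem?_set_ne (fun hh => hn hh.symm)]

theorem pvFoldl_flatMap {α β γ : Type} (l : List α) (f : α → List β) (g : γ → β → γ) (init : γ) :
    (l.flatMap f).foldl g init = l.foldl (fun st a => (f a).foldl g st) init := by
  induction l generalizing init with
  | nil => rfl
  | cons a t ih => simp [List.flatMap_cons, List.foldl_append, ih]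

theorem pvMap_const_pyRange {α : Type} (n : Int) (x : α) :
    (PySem.List.pyRange 0 n 1).map (fun _ => x) = List.replicate n.toNat x := by
  rw [PySem.List.pyRange_one, List.map_map]
  have : ((fun _ : Int => x) ∘ fun k : Nat => (0 : Int) + k) = Function.const Nat x := rfl
  rw [this, List.map_const, List.length_range]
  simp

-- pvSet2 / pvGet2 facts ------------------------------------------------------

theorem pvLength_pvSet2 (g : List (List String)) (r c : Nat) (v : String) :
    (pvSet2 g r c v).length = g.length := by
  simp [pvSet2]

theorem pvRowLen_pvSet2 (g : List (List String)) (r c : Nat) (v : String) (r' : Nat) :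
    ((pvSet2 g r c v).getD r' []).length = (g.getD r' []).length := by
  by_cases h : r' = r
  · rw [h]
    by_cases hr : r < g.length
    · rw [pvSet2, pvGetD_set_self _ _ _ _ hr, List.length_set]
    · rw [pvSet2, List.set_eq_of_length_le (by omega)]
  · rw [pvSet2, pvGetD_set_ne _ _ _ _ _ (fun hh => h hh.symm)]

theorem pvGet2_pvSet2_ne (g : List (List String)) (r c r' c' : Nat) (v : String)
    (h : r ≠ r' ∨ c ≠ c') : pvGet2 (pvSet2 g r' c' v) r c = pvGet2 g r c := by
  rcases h with h | h
  · rw [pvGet2, pvSet2, pvGetD_set_ne _ _ _ _ _ (fun hh => h hh.symm), pvGet2]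
  · by_cases hr : r = r'
    · subst hr
      by_cases hlen : r < g.length
      · rw [pvGet2, pvSet2, pvGetD_set_self _ _ _ _ hlen,
            pvGetD_set_ne _ _ _ _ _ (fun hh => h hh.symm), pvGet2]
      · rw [pvGet2, pvSet2, List.set_eq_of_length_le (by omega), pvGet2]
    · rw [pvGet2, pvSet2, pvGetD_set_ne _ _ _ _ _ (fun hh => hr hh.symm), pvGet2]

theorem pvGet2_pvSet2_self (g : List (List String)) (r c : Nat) (v : String)
    (hr : r < g.length) (hc : c < (g.getD r []).length) :
    pvGet2 (pvSet2 g r c v) r c = v := by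
  rw [pvGet2, pvSet2, pvGetD_set_self _ _ _ _ hr, pvGetD_set_self _ _ _ _ hc]

-- A-side normalization -------------------------------------------------------

theorem pvPairStep_stuck (m p : List String) (L : List (Int × Int))
    (g : List (List String)) (im ip : Nat) (h : ¬ (im < m.length ∧ ip < p.length)) :
    L.foldl (pvPairStep m p) (g, im, ip) = (g, im, ip) := by
  induction L with
  | nil => rfl
  | cons q t ih => simp only [List.foldl_cons, pvPairStep, if_neg h]; exact ih

theorem pvPhase1Cols_eq_foldl (m p : List String) (row : Int) (cols : List Int)
    (st : List (List String) × Nat × Nat) :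
    pvPhase1Cols m p row cols st = (cols.map (fun c => (row, c))).foldl (pvPairStep m p) st := by
  induction cols generalizing st with
  | nil => rfl
  | cons c rest ih =>
    obtain ⟨g, im, ip⟩ := st
    by_cases h : im < m.length ∧ ip < p.length
    · simp only [pvPhase1Cols, if_pos h, List.map_cons, List.foldl_cons, pvPairStep, ih]
    · simp only [pvPhase1Cols, List.map_cons, List.foldl_cons, pvPairStep, if_neg h]
      rw [pvPairStep_stuck m p _ _ _ _ h]

-- B-side normalization -------------------------------------------------------

theorem pvRunSlots_stuck (m p : List String) (L : List (Int × Int × Int))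
    (gs : List (List (List String))) (im ip : Nat)
    (h1 : m.length ≤ im) (h2 : p.length ≤ ip) :
    pvRunSlots m p L (gs, im, ip) = (gs, im, ip) := by
  induction L with
  | nil => rfl
  | cons q t ih =>
    obtain ⟨g, r, c⟩ := q
    simp only [pvRunSlots, if_neg (by omega : ¬ (im < m.length ∧ ip < p.length)),
      if_neg (by omega : ¬ im < m.length), if_neg (by omega : ¬ ip < p.length)]

theorem pvBStep_stuck (m p : List String) (L : List (Int × Int))
    (g : List (List String)) (im ip : Nat) (h1 : m.length ≤ im) (h2 : p.length ≤ ip) :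
    L.foldl (pvBStep m p) (g, im, ip) = (g, im, ip) := by
  induction L with
  | nil => rfl
  | cons q t ih =>
    simp only [List.foldl_cons, pvBStep, if_neg (by omega : ¬ (im < m.length ∧ ip < p.length)),
      if_neg (by omega : ¬ im < m.length), if_neg (by omega : ¬ ip < p.length)]
    exact ih

theorem pvRunSlots_append (m p : List String) (L1 L2 : List (Int × Int × Int))
    (st : List (List (List String)) × Nat × Nat) :
    pvRunSlots m p (L1 ++ L2) st = pvRunSlots m p L2 (pvRunSlots m p L1 st) := by
  induction L1 generalizing st with
  | nil => rfl
  | cons q t ih =>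
    obtain ⟨g, r, c⟩ := q
    obtain ⟨gs, im, ip⟩ := st
    by_cases h1 : im < m.length ∧ ip < p.length
    · simp only [List.cons_append, pvRunSlots, if_pos h1]; exact ih _
    · by_cases h2 : im < m.length
      · simp only [List.cons_append, pvRunSlots, if_neg h1, if_pos h2]; exact ih _
      · by_cases h3 : ip < p.length
        · simp only [List.cons_append, pvRunSlots, if_neg h1, if_neg h2, if_pos h3]; exact ih _
        · simp only [List.cons_append, pvRunSlots, if_neg h1, if_neg h2, if_neg h3]
          rw [pvRunSlots_stuck m p L2 gs im ip (by omega) (by omega)]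

theorem pvRunSlots_lift (m p : List String) (Q : List (Int × Int)) (g : Int)
    (gs : List (List (List String))) (im ip : Nat) (hg : g.toNat < gs.length) :
    pvRunSlots m p (Q.map (fun rc => (g, rc.1, rc.2))) (gs, im, ip)
      = (gs.set g.toNat (Q.foldl (pvBStep m p) (gs.getD g.toNat [], im, ip)).1,
         (Q.foldl (pvBStep m p) (gs.getD g.toNat [], im, ip)).2) := by
  induction Q generalizing gs im ip with
  | nil =>
    simp only [List.map_nil, List.foldl_nil, pvRunSlots]
    rw [pvSet_getD_self _ _ _ hg]
  | cons q t ih =>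
    obtain ⟨r, c⟩ := q
    have hset3 : ∀ (gs' : List (List (List String))) (a r' c' : Nat) (v : String),
        pvSet3 gs' a r' c' v = gs'.set a (pvSet2 (gs'.getD a []) r' c' v) := fun _ _ _ _ _ => rfl
    by_cases h1 : im < m.length ∧ ip < p.length
    · simp only [List.map_cons, pvRunSlots, if_pos h1, List.foldl_cons, pvBStep]
      rw [hset3, hset3, pvGetD_set_self _ _ _ _ hg, List.set_set,
        ih _ _ _ (by simpa using hg), pvGetD_set_self _ _ _ _ hg, List.set_set]
    · by_cases h2 : im < m.length
      · simp only [List.map_cons, pvRunSlots, if_neg h1, if_pos h2, List.foldl_cons, pvBStep]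
        rw [hset3, ih _ _ _ (by simpa using hg), pvGetD_set_self _ _ _ _ hg, List.set_set]
      · by_cases h3 : ip < p.length
        · simp only [List.map_cons, pvRunSlots, if_neg h1, if_neg h2, if_pos h3,
            List.foldl_cons, pvBStep]
          rw [hset3, ih _ _ _ (by simpa using hg), pvGetD_set_self _ _ _ _ hg, List.set_set]
        · simp only [List.map_cons, pvRunSlots, if_neg h1, if_neg h2, if_neg h3,
            List.foldl_cons, pvBStep]
          rw [pvBStep_stuck m p t _ im ip (by omega) (by omega)]
          rw [pvSet_getD_self _ _ _ hg]

-- noninterference: the pair phase never changes an even cell it was not given --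

theorem pvPairFold_get2 (m p : List String) (L : List (Int × Int))
    (st : List (List String) × Nat × Nat) (r c : Nat)
    (hL : ∀ q ∈ L, (q.1.toNat ≠ r ∨ q.2.toNat ≠ c) ∧ q.2.toNat % 2 = 0) (hc : c % 2 = 0) :
    pvGet2 (L.foldl (pvPairStep m p) st).1 r c = pvGet2 st.1 r c := by
  induction L generalizing st with
  | nil => rfl
  | cons q t ih =>
    have hq := hL q (by simp)
    have ht : ∀ q' ∈ t, (q'.1.toNat ≠ r ∨ q'.2.toNat ≠ c) ∧ q'.2.toNat % 2 = 0 :=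
      fun q' hq' => hL q' (by simp [hq'])
    obtain ⟨g, im, ip⟩ := st
    by_cases h1 : im < m.length ∧ ip < p.length
    · simp only [List.foldl_cons, pvPairStep, if_pos h1]
      rw [ih _ ht]
      rw [pvGet2_pvSet2_ne _ _ _ _ _ _ (Or.inr (by omega)),
        pvGet2_pvSet2_ne _ _ _ _ _ _ (by tauto)]
    · simp only [List.foldl_cons, pvPairStep, if_neg h1]
      exact ih _ ht

-- the core: A's two phases over a list of fresh even cells = B's one pass -----

theorem pvCore (m p : List String) (hm : "Empty" ∉ m) (Q : List (Int × Int)) :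
    ∀ (g : List (List String)) (im ip : Nat),
    (Q.Pairwise (fun a b => ¬ (a.1.toNat = b.1.toNat ∧ a.2.toNat = b.2.toNat))) →
    (∀ q ∈ Q, q.2.toNat % 2 = 0) →
    (∀ q ∈ Q, q.1.toNat < g.length ∧ q.2.toNat + 1 < (g.getD q.1.toNat []).length) →
    (∀ q ∈ Q, pvGet2 g q.1.toNat q.2.toNat = "Empty") →
    Q.foldl (pvLeftStep m p) (Q.foldl (pvPairStep m p) (g, im, ip)) =
      Q.foldl (pvBStep m p) (g, im, ip) := by
  induction Q with
  | nil => intro g im ip _ _ _ _; rfl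
  | cons q t ih =>
    intro g im ip hnd heven hrange hempty
    obtain ⟨r, c⟩ := q
    obtain ⟨hhead, hndt⟩ := List.pairwise_cons.mp hnd
    have hevent : ∀ q' ∈ t, q'.2.toNat % 2 = 0 := fun q' h => heven q' (by simp [h])
    have hevenh : c.toNat % 2 = 0 := heven (r, c) (by simp)
    have hrangeh := hrange (r, c) (by simp)
    have hemptyh := hempty (r, c) (by simp)
    have hne : ∀ q' ∈ t, (q'.1.toNat ≠ r.toNat ∨ q'.2.toNat ≠ c.toNat) ∧ q'.2.toNat % 2 = 0 := by
      intro q' hq'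
      have := hhead q' hq'
      exact ⟨by tauto, hevent q' hq'⟩
    by_cases h1 : im < m.length ∧ ip < p.length
    · -- pair branch
      have hmv : m.getD im "" ∈ m := by
        rw [List.getD_eq_getElem m "" h1.1]; exact List.getElem_mem _
      have hXg : pvGet2 (t.foldl (pvPairStep m p)
            (pvSet2 (pvSet2 g r.toNat c.toNat (m.getD im "")) r.toNat (c.toNat + 1)
              (p.getD ip ""), im + 1, ip + 1)).1 r.toNat c.toNat = m.getD im "" := by
        rw [pvPairFold_get2 m p t _ r.toNat c.toNat hne hevenh]
        rw [pvGet2_pvSet2_ne _ _ _ _ _ _ (Or.inr (by omega)),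
          pvGet2_pvSet2_self _ _ _ _ hrangeh.1 (by omega)]
      simp only [List.foldl_cons, pvPairStep, if_pos h1, pvBStep, pvLeftStep, pvPhase2Cell]
      rw [if_neg (by rw [hXg]; exact fun hc => hm (hc ▸ hmv))]
      apply ih
      · exact hndt
      · exact hevent
      · intro q' hq'
        obtain ⟨ha, hb⟩ := hrange q' (by simp [hq'])
        rw [pvLength_pvSet2, pvLength_pvSet2, pvRowLen_pvSet2, pvRowLen_pvSet2]
        exact ⟨ha, hb⟩
      · intro q' hq'
        rw [pvGet2_pvSet2_ne _ _ _ _ _ _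
            (Or.inr (by have h2 := hevent q' hq'; omega)),
          pvGet2_pvSet2_ne _ _ _ _ _ _ (by have := hne q' hq'; tauto)]
        exact hempty q' (by simp [hq'])
    · -- no more pairs: the pair phase is inert from here on
      simp only [List.foldl_cons]
      rw [show pvPairStep m p (g, im, ip) (r, c) = (g, im, ip) from by
        simp only [pvPairStep, if_neg h1]]
      rw [pvPairStep_stuck m p t g im ip h1]
      by_cases h2 : im < m.length
      · rw [show pvLeftStep m p (g, im, ip) (r, c)
            = (pvSet2 g r.toNat c.toNat (m.getD im ""), im + 1, ip) from by
          simp only [pvLeftStep, pvPhase2Cell, if_pos hemptyh, if_pos h2]]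
        rw [show pvBStep m p (g, im, ip) (r, c)
            = (pvSet2 g r.toNat c.toNat (m.getD im ""), im + 1, ip) from by
          simp only [pvBStep, if_neg h1, if_pos h2]]
        have key := ih (pvSet2 g r.toNat c.toNat (m.getD im "")) (im + 1) ip hndt hevent
          (by intro q' hq'
              obtain ⟨ha, hb⟩ := hrange q' (by simp [hq'])
              rw [pvLength_pvSet2, pvRowLen_pvSet2]
              exact ⟨ha, hb⟩)
          (by intro q' hq'
              rw [pvGet2_pvSet2_ne _ _ _ _ _ _ (by have := hne q' hq'; tauto)]
              exact hempty q' (by simp [hq']))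
        rw [pvPairStep_stuck m p t (pvSet2 g r.toNat c.toNat (m.getD im "")) (im + 1) ip
          (by omega)] at key
        exact key
      · by_cases h3 : ip < p.length
        · rw [show pvLeftStep m p (g, im, ip) (r, c)
              = (pvSet2 g r.toNat (c.toNat + 1) (p.getD ip ""), im, ip + 1) from by
            simp only [pvLeftStep, pvPhase2Cell, if_pos hemptyh, if_neg h2, if_pos h3]]
          rw [show pvBStep m p (g, im, ip) (r, c)
              = (pvSet2 g r.toNat (c.toNat + 1) (p.getD ip ""), im, ip + 1) from by
            simp only [pvBStep, if_neg h1, if_neg h2, if_pos h3]]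
          have key := ih (pvSet2 g r.toNat (c.toNat + 1) (p.getD ip "")) im (ip + 1) hndt hevent
            (by intro q' hq'
                obtain ⟨ha, hb⟩ := hrange q' (by simp [hq'])
                rw [pvLength_pvSet2, pvRowLen_pvSet2]
                exact ⟨ha, hb⟩)
            (by intro q' hq'
                rw [pvGet2_pvSet2_ne _ _ _ _ _ _
                  (Or.inr (by have h4 := hevent q' hq'; omega))]
                exact hempty q' (by simp [hq']))
          rw [pvPairStep_stuck m p t (pvSet2 g r.toNat (c.toNat + 1) (p.getD ip "")) im
            (ip + 1) (by omega)] at key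
          exact key
        · rw [show pvLeftStep m p (g, im, ip) (r, c) = (g, im, ip) from by
            simp only [pvLeftStep, pvPhase2Cell, if_pos hemptyh, if_neg h2, if_neg h3]]
          rw [show pvBStep m p (g, im, ip) (r, c) = (g, im, ip) from by
            simp only [pvBStep, if_neg h1, if_neg h2, if_neg h3]]
          have key := ih g im ip hndt hevent
            (fun q' hq' => hrange q' (by simp [hq']))
            (fun q' hq' => hempty q' (by simp [hq']))
          rw [pvPairStep_stuck m p t g im ip h1] at key
          exact key

-- properties of the within-class position list and the fresh grid -------------

theorem pvQ_pairwise (rows columns : Int) :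
    (pvQ rows columns).Pairwise (fun a b => ¬ (a.1.toNat = b.1.toNat ∧ a.2.toNat = b.2.toNat)) := by
  rw [pvQ, List.pairwise_flatMap]
  constructor
  · intro r _
    rw [PySem.List.pyRange_of_pos 0 (columns * 2) (by norm_num), List.map_map, List.pairwise_map]
    refine List.pairwise_lt_range.imp ?_
    intro k1 k2 hk hcon
    obtain ⟨-, h2⟩ := hcon
    simp only [Function.comp] at h2
    omega
  · rw [PySem.List.pyRange_one 0 rows, List.pairwise_map]
    refine List.pairwise_lt_range.imp ?_
    intro k1 k2 hk x hx y hy hcon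
    simp only [List.mem_map] at hx hy
    obtain ⟨c1, -, rfl⟩ := hx
    obtain ⟨c2, -, rfl⟩ := hy
    obtain ⟨h1, -⟩ := hcon
    simp only at h1
    omega

theorem pvQ_even (rows columns : Int) : ∀ q ∈ pvQ rows columns, q.2.toNat % 2 = 0 := by
  intro q hq
  rw [pvQ] at hq
  simp only [List.mem_flatMap, List.mem_map] at hq
  obtain ⟨r, -, c, hc, rfl⟩ := hq
  have := (PySem.List.mem_pyRange_iff_of_pos (by norm_num) c).mp hc
  simp only
  omega

theorem pvQ_range (rows columns : Int) : ∀ q ∈ pvQ rows columns,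
    q.1.toNat < (pvFresh rows columns).length ∧
      q.2.toNat + 1 < ((pvFresh rows columns).getD q.1.toNat []).length := by
  intro q hq
  rw [pvQ] at hq
  simp only [List.mem_flatMap, List.mem_map] at hq
  obtain ⟨r, hr, c, hc, rfl⟩ := hq
  have hrr := (PySem.List.mem_pyRange_one).mp hr
  have hcc := (PySem.List.mem_pyRange_iff_of_pos (by norm_num) c).mp hc
  rw [pvFresh]
  simp only [List.length_replicate]
  constructor
  · omega
  · rw [List.getD_replicate _ (by omega : r.toNat < rows.toNat), List.length_replicate]
    omega

theorem pvQ_empty (rows columns : Int) : ∀ q ∈ pvQ rows columns,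
    pvGet2 (pvFresh rows columns) q.1.toNat q.2.toNat = "Empty" := by
  intro q hq
  rw [pvQ] at hq
  simp only [List.mem_flatMap, List.mem_map] at hq
  obtain ⟨r, hr, c, hc, rfl⟩ := hq
  have hrr := (PySem.List.mem_pyRange_one).mp hr
  have hcc := (PySem.List.mem_pyRange_iff_of_pos (by norm_num) c).mp hc
  rw [pvFresh, pvGet2]
  simp only
  rw [List.getD_replicate _ (by omega : r.toNat < rows.toNat),
    List.getD_replicate _ (by omega : c.toNat < (columns * 2).toNat)]

-- the two per-class bodies agree ----------------------------------------------

theorem pvABody_eq (m p : List String) (hm : "Empty" ∉ m) (rows columns : Int)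
    (st : List (List (List String)) × Nat × Nat) :
    (let g0 := (PySem.List.pyRange 0 rows 1).map
        (fun _ => (PySem.List.pyRange 0 (columns * 2) 1).map (fun _ => "Empty"))
     let st1 := (PySem.List.pyRange 0 rows 1).foldl
        (fun s r => pvPhase1Cols m p r (PySem.List.pyRange 0 (columns * 2) 2) s)
        (g0, st.2.1, st.2.2)
     let st2 := (PySem.List.pyRange 0 rows 1).foldl
        (fun s r => (PySem.List.pyRange 0 (columns * 2) 2).foldl (pvPhase2Cell m p r) s) st1
     ((st.1 ++ [st2.1], st2.2.1, st2.2.2) : List (List (List String)) × Nat × Nat))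
      = pvClassBody m p rows columns st := by
  simp only [pvMap_const_pyRange, pvPhase1Cols_eq_foldl]
  rw [← pvFoldl_flatMap]
  have hst2 : ∀ (s : List (List String) × Nat × Nat) (r : Int),
      (PySem.List.pyRange 0 (columns * 2) 2).foldl (pvPhase2Cell m p r) s
        = ((PySem.List.pyRange 0 (columns * 2) 2).map (fun c => (r, c))).foldl
            (pvLeftStep m p) s := by
    intro s r
    rw [List.foldl_map]
    rfl
  simp only [hst2]
  rw [← pvFoldl_flatMap]
  have hfresh : List.replicate rows.toNat (List.replicate (columns * 2).toNat "Empty")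
      = pvFresh rows columns := rfl
  rw [hfresh]
  rw [show ((PySem.List.pyRange 0 rows 1).flatMap
      (fun r => (PySem.List.pyRange 0 (columns * 2) 2).map (fun c => (r, c))))
      = pvQ rows columns from rfl]
  rw [pvCore m p hm (pvQ rows columns) (pvFresh rows columns) st.2.1 st.2.2
    (pvQ_pairwise rows columns) (pvQ_even rows columns) (pvQ_range rows columns)
    (pvQ_empty rows columns)]
  rfl

-- the main induction: B's flat run over n classes = n iterations of the body --

theorem pvMain (m p : List String) (rows columns : Int) (n : Nat) :
    ∀ (acc : List (List (List String))) (im ip : Nat),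
    pvRunSlots m p
      ((PySem.List.pyRange (acc.length : Int) ((acc.length : Int) + n) 1).flatMap
        (fun g => (pvQ rows columns).map (fun rc => (g, rc.1, rc.2))))
      (acc ++ List.replicate n (pvFresh rows columns), im, ip)
      = pvClassIter m p rows columns n (acc, im, ip) := by
  induction n with
  | zero =>
    intro acc im ip
    rw [show ((acc.length : Int) + (0 : Nat)) = (acc.length : Int) by push_cast; ring]
    rw [PySem.List.pyRange_one_eq_nil le_rfl]
    simp [pvRunSlots, pvClassIter]
  | succ n ihn =>
    intro acc im ip
    rw [PySem.List.pyRange_one_cons (by push_cast; omega)]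
    rw [List.flatMap_cons, pvRunSlots_append]
    have hlen : ((acc.length : Int)).toNat < (acc ++ List.replicate (n + 1) (pvFresh rows columns)).length := by
      simp
    rw [pvRunSlots_lift m p _ _ _ _ _ hlen]
    have hgetD : (acc ++ List.replicate (n + 1) (pvFresh rows columns)).getD
        ((acc.length : Int)).toNat [] = pvFresh rows columns := by
      rw [Int.toNat_natCast, List.getD_append_right _ _ _ _ le_rfl]
      simp [List.replicate_succ]
    rw [hgetD]
    have hset : ∀ X : List (List String),
        (acc ++ List.replicate (n + 1) (pvFresh rows columns)).set
          ((acc.length : Int)).toNat X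
        = (acc ++ [X]) ++ List.replicate n (pvFresh rows columns) := by
      intro X
      rw [Int.toNat_natCast, List.set_append, if_neg (by omega), Nat.sub_self,
        List.replicate_succ, List.set_cons_zero, List.append_assoc, List.singleton_append]
    rw [hset]
    have hrange : PySem.List.pyRange ((acc.length : Int) + 1)
        ((acc.length : Int) + ((n + 1 : Nat) : Int)) 1
        = PySem.List.pyRange (((acc ++ [(List.foldl (pvBStep m p)
            (pvFresh rows columns, im, ip) (pvQ rows columns)).1]).length : Int))
          ((((acc ++ [(List.foldl (pvBStep m p) (pvFresh rows columns, im, ip)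
            (pvQ rows columns)).1]).length : Int)) + (n : Int)) 1 := by
      congr 1 <;> (simp only [List.length_append, List.length_cons, List.length_nil]; push_cast; ring)
    rw [hrange]
    rw [ihn]
    rw [pvClassIter]
    rfl

theorem pvAFold_eq_iter (m p : List String) (hm : "Empty" ∉ m) (rows columns : Int)
    (L : List Int) (st : List (List (List String)) × Nat × Nat) :
    L.foldl
      (fun st _ =>
        let g0 := (PySem.List.pyRange 0 rows 1).map
          (fun _ => (PySem.List.pyRange 0 (columns * 2) 1).map (fun _ => "Empty"))
        let st1 := (PySem.List.pyRange 0 rows 1).foldl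
          (fun s r => pvPhase1Cols m p r (PySem.List.pyRange 0 (columns * 2) 2) s)
          (g0, st.2.1, st.2.2)
        let st2 := (PySem.List.pyRange 0 rows 1).foldl
          (fun s r => (PySem.List.pyRange 0 (columns * 2) 2).foldl (pvPhase2Cell m p r) s) st1
        (st.1 ++ [st2.1], st2.2.1, st2.2.2)) st
      = pvClassIter m p rows columns L.length st := by
  induction L generalizing st with
  | nil => rfl
  | cons a t ih =>
    rw [List.foldl_cons, List.length_cons, ih, pvClassIter]
    congr 1
    exact pvABody_eq m p hm rows columns st

-- ===== VERDICT (by name: the statement is the Claim_ definition above) =====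
theorem generate_combined_seating_spec : Claim_equal_generate_combined_seating := by
  intro nc rows columns ml pl _ hpre
  show generate_combined_seating nc rows columns ml pl
      = generate_combined_seating_alt nc rows columns ml pl
  have hm : "Empty" ∉ PySem.List.sorted ml (fun x => x) false := by
    rw [PySem.List.mem_sorted]; exact hpre
  simp only [generate_combined_seating, generate_combined_seating_alt]
  rw [pvAFold_eq_iter (PySem.List.sorted ml (fun x => x) false)
    (PySem.List.sorted pl (fun x => x) false) hm rows columns]
  rw [PySem.List.length_pyRange_one, show nc + 1 - 1 = nc from by ring]
  simp only [pvMap_const_pyRange]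
  rw [show (fun g => (PySem.List.pyRange 0 rows 1).flatMap
        (fun r => (PySem.List.pyRange 0 (columns * 2) 2).map (fun c => (g, r, c))))
      = (fun g : Int => (pvQ rows columns).map (fun rc => (g, rc.1, rc.2))) from by
    funext g
    rw [pvQ, List.map_flatMap]
    simp only [List.map_map]
    rfl]
  rw [show PySem.List.pyRange 0 nc 1 = PySem.List.pyRange 0 ((nc.toNat : Int)) 1 from by
    by_cases h : 0 ≤ nc
    · rw [Int.toNat_of_nonneg h]
    · rw [PySem.List.pyRange_one_eq_nil (by omega), PySem.List.pyRange_one_eq_nil (by omega)]]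
  have hmain := pvMain (PySem.List.sorted ml (fun x => x) false)
    (PySem.List.sorted pl (fun x => x) false) rows columns nc.toNat [] 0 0
  simp only [List.length_nil, Nat.cast_zero, zero_add, List.nil_append, pvFresh] at hmain
  rw [hmain]
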